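-- pv_equiv track=rewrite | github.com/narien/AoC2019 | day4/SecureContainer.py | checkDoubleDigit
-- ===== SOURCE A (Python) =====
-- def checkDoubleDigit(value):
--     prevChar = 'a'
--     currCount = 1
--     countOfRecurrance = {1}
--     for i in str(value):
--         if i == prevChar:
--             currCount += 1
--         else:
--             countOfRecurrance.add(currCount)
--             currCount = 1
--         prevChar = i
--     countOfRecurrance.add(currCount)
--     return (len(countOfRecurrance) > 1, 2 in countOfRecurrance)
-- ===== SOURCE B (Python) =====
-- def checkDoubleDigit(value):
--     s = str(value)
--     counts = []
--     i = 0
--     while i < len(s):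
--         j = i
--         while j < len(s) and s[j] == s[i]:
--             j += 1
--         counts.append(j - i)
--         i = j
--     return (any(c > 1 for c in counts), 2 in counts)
-- ===== Notes on version B (the rewrite author's own statement) =====
-- stated objective: alternative
-- what changed: B first materializes the list of consecutive run lengths of str(value) with a two-pointer scan and then checks it for a run longer than a single character and for a run of exactly two, replacing A's incremental prevChar/currCount state machine that pours run lengths into a pre-seeded set and inspects the set's size and membership.
import Mathlib
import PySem

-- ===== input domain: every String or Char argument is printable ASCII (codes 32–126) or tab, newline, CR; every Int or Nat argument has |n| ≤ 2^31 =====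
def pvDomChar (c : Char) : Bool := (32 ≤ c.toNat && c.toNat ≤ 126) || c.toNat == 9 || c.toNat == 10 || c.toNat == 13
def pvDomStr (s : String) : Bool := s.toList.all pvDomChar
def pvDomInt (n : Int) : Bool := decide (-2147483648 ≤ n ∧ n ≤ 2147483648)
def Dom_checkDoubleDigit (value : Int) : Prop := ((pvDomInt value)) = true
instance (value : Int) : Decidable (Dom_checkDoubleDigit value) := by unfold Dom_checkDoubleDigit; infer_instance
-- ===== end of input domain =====

-- B replaces A's prevChar/currCount/set state machine by first materializing the
-- list of consecutive run lengths (two-pointer scan) and then doing two checks on it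
-- (objective: alternative, same cost).

-- ===== PORT A =====
-- literal transliteration: state (prevChar, currCount, countOfRecurrance); set is PySem.Set Int
def stepA (st : Char × Int × PySem.Set Int) (i : Char) : Char × Int × PySem.Set Int :=
  if i == st.1 then (i, st.2.1 + 1, st.2.2)
  else (i, 1, st.2.2.add st.2.1)

def checkDoubleDigit (value : Int) : Bool × Bool :=
  let st := (PySem.Int.toChars value).foldl stepA ('a', 1, PySem.Set.ofList [1])
  let s := st.2.2.add st.2.1
  (decide (PySem.Set.len s > 1), PySem.Set.contains s 2)

-- ===== PORT B =====
-- inner while loop: run = leading chars equal to the head; outer loop: recurse on the rest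
def runLengthsB : List Char → List Int
  | [] => []
  | c :: cs =>
    (((cs.takeWhile (fun d => d == c)).length : Int) + 1)
      :: runLengthsB (cs.dropWhile (fun d => d == c))
  termination_by l => l.length
  decreasing_by
    have := List.length_dropWhile_le (fun d => d == c) cs
    simp; omega

def checkDoubleDigit_alt (value : Int) : Bool × Bool :=
  let counts := runLengthsB (PySem.Int.toChars value)
  (counts.any (fun c => decide (1 < c)), counts.contains 2)

-- ===== PRECONDITION & SPEC =====
def Spec_checkDoubleDigit (value : Int) (out : Bool × Bool) : Prop := out = checkDoubleDigit_alt value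
instance (value : Int) (out : Bool × Bool) : Decidable (Spec_checkDoubleDigit value out) := by unfold Spec_checkDoubleDigit; infer_instance

-- ===== CLAIM (what is proved, stated in full; the proofs are below) =====
def Claim_equal_checkDoubleDigit : Prop := ∀ (value : Int), Dom_checkDoubleDigit value → Spec_checkDoubleDigit value (checkDoubleDigit value)

-- ===== LEMMAS AND PROOFS =====

-- proof-side reading of A's loop: the run lengths it will add, starting from (prev, n)
def goRL (c : Char) (n : Int) : List Char → List Int
  | [] => [n]
  | d :: ds => if d == c then goRL c (n + 1) ds else n :: goRL d 1 ds

theorem foldA_eq_goRL (l : List Char) : ∀ (prev : Char) (cnt : Int) (S : PySem.Set Int),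
    (l.foldl stepA (prev, cnt, S)).2.2.add (l.foldl stepA (prev, cnt, S)).2.1
      = (goRL prev cnt l).foldl PySem.Set.add S := by
  induction l with
  | nil => intro prev cnt S; simp [goRL]
  | cons d ds ih =>
    intro prev cnt S
    by_cases h : d = prev
    · subst h
      simp only [List.foldl_cons, goRL, stepA, BEq.rfl, if_pos]
      exact ih d (cnt + 1) S
    · have hb : (d == prev) = false := by simp [h]
      simp only [List.foldl_cons, goRL, stepA, hb, Bool.false_eq_true, if_false]
      exact ih d 1 (S.add cnt)

theorem goRL_eq_runLengthsB (l : List Char) : ∀ (c : Char) (n : Int),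
    goRL c n l = (n + ((l.takeWhile (fun d => d == c)).length : Int))
      :: runLengthsB (l.dropWhile (fun d => d == c)) := by
  induction l with
  | nil => intro c n; simp [goRL, runLengthsB]
  | cons d ds ih =>
    intro c n
    by_cases h : d = c
    · subst h
      simp only [goRL, BEq.rfl, if_pos, List.takeWhile_cons, List.dropWhile_cons]
      rw [ih d (n + 1)]
      simp only [List.length_cons]
      congr 1
      push_cast
      ring
    · have hb : (d == c) = false := by simp [h]
      simp only [goRL, hb, Bool.false_eq_true, if_false, List.takeWhile_cons, List.dropWhile_cons]
      rw [ih d 1, runLengthsB]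
      simp only [List.length_nil, Int.natCast_zero, add_zero]
      congr 2
      ring

theorem runLengthsB_head (c : Char) (cs : List Char) :
    runLengthsB (c :: cs) = goRL c 1 cs := by
  rw [goRL_eq_runLengthsB, runLengthsB]
  congr 1
  ring

theorem goRL_pos (l : List Char) : ∀ (c : Char) (n : Int), 1 ≤ n →
    ∀ x ∈ goRL c n l, 1 ≤ x := by
  induction l with
  | nil => intro c n hn x hx; simp [goRL] at hx; omega
  | cons d ds ih =>
    intro c n hn x hx
    by_cases h : (d == c) = true
    · rw [goRL, if_pos h] at hx
      exact ih c (n + 1) (by omega) x hx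
    · rw [goRL, if_neg h] at hx
      rcases List.mem_cons.mp hx with h1 | h2
      · omega
      · exact ih d 1 le_rfl x h2

-- char-level facts about str(n): nonempty, and it never starts with 'a'
theorem digitChar_mod_ne_a (n : Nat) : (n % 10).digitChar ≠ 'a' := by
  have h : n % 10 < 10 := Nat.mod_lt _ (by norm_num)
  set m := n % 10 with hm
  interval_cases m <;> decide

theorem toDigitsCore_not_a : ∀ (fuel n : Nat) (ds : List Char),
    'a' ∉ ds → 'a' ∉ Nat.toDigitsCore 10 fuel n ds := by
  intro fuel
  induction fuel with
  | zero => intro n ds h; rw [Nat.toDigitsCore.eq_def]; exact h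
  | succ f ih =>
    intro n ds h
    rw [Nat.toDigitsCore.eq_def]
    simp only
    split
    · intro hmem
      rcases List.mem_cons.mp hmem with h1 | h2
      · exact digitChar_mod_ne_a n h1.symm
      · exact h h2
    · refine ih _ _ ?_
      intro hmem
      rcases List.mem_cons.mp hmem with h1 | h2
      · exact digitChar_mod_ne_a n h1.symm
      · exact h h2

theorem toChars_head_ne_a (v : Int) (c : Char) (cs : List Char)
    (h : PySem.Int.toChars v = c :: cs) : c ≠ 'a' := by
  unfold PySem.Int.toChars at h
  split at h
  · cases h
    decide
  · have hmem : c ∈ Nat.toDigits 10 v.toNat := by rw [h]; exact List.mem_cons_self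
    have hna : 'a' ∉ Nat.toDigits 10 v.toNat :=
      toDigitsCore_not_a _ _ [] (by simp)
    intro hc
    exact hna (hc ▸ hmem)

-- two distinct members force length > 1; all members equal (with Nodup) force length ≤ 1
theorem length_le_one_of_all_eq {l : List Int} (hnd : l.Nodup) (a : Int)
    (h : ∀ x ∈ l, x = a) : l.length ≤ 1 := by
  match l with
  | [] => simp
  | [x] => simp
  | x :: y :: t =>
    have hx := h x (by simp)
    have hy := h y (by simp)
    exfalso
    have hxm : x ∉ y :: t := (List.nodup_cons.mp hnd).1
    refine hxm ?_
    rw [hx, hy]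
    exact List.mem_cons_self

theorem one_lt_length_of_two_mem {l : List Int} (a b : Int)
    (ha : a ∈ l) (hb : b ∈ l) (hne : a ≠ b) : 1 < l.length := by
  match l with
  | [] => cases ha
  | [x] =>
    rcases List.mem_singleton.mp ha with rfl
    rcases List.mem_singleton.mp hb with rfl
    exact absurd rfl hne
  | x :: y :: t => simp

theorem main_set_eq (counts : List Int) (hpos : ∀ x ∈ counts, 1 ≤ x) :
    (decide (PySem.Set.len (counts.foldl PySem.Set.add (PySem.Set.ofList [1])) > 1),
      PySem.Set.contains (counts.foldl PySem.Set.add (PySem.Set.ofList [1])) 2)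
      = (counts.any (fun c => decide (1 < c)), counts.contains 2) := by
  have hT : counts.foldl PySem.Set.add (PySem.Set.ofList [1])
      = PySem.Set.update (PySem.Set.ofList [1]) counts := rfl
  rw [hT]
  have hmem : ∀ x : Int, x ∈ PySem.Set.update (PySem.Set.ofList [1]) counts ↔ x = 1 ∨ x ∈ counts := by
    intro x
    rw [PySem.Set.mem_update]
    simp [PySem.Set.mem_ofList]
  have hnd : (PySem.Set.update (PySem.Set.ofList [1]) counts).Nodup :=
    PySem.Set.nodup_update _ _ (PySem.Set.nodup_ofList _)
  have h1T : (1 : Int) ∈ PySem.Set.update (PySem.Set.ofList [1]) counts :=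
    (hmem 1).mpr (Or.inl rfl)
  refine Prod.ext ?_ ?_
  · show decide _ = _
    rw [Bool.eq_iff_iff]
    rw [decide_eq_true_iff, List.any_eq_true]
    simp only [decide_eq_true_iff]
    have hlen : PySem.Set.len (PySem.Set.update (PySem.Set.ofList [1]) counts)
        = ((PySem.Set.update (PySem.Set.ofList [1]) counts).length : Int) := by
      simp [PySem.Set.len]
    rw [hlen]
    constructor
    · intro hgt
      by_contra hall
      push Not at hall
      have hone : ∀ x ∈ PySem.Set.update (PySem.Set.ofList [1]) counts, x = 1 := by
        intro x hx
        rcases (hmem x).mp hx with h | h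
        · exact h
        · have := hpos x h
          have := hall x h
          omega
      have := length_le_one_of_all_eq hnd 1 hone
      omega
    · rintro ⟨c, hc, h1c⟩
      have hcT : c ∈ PySem.Set.update (PySem.Set.ofList [1]) counts := (hmem c).mpr (Or.inr hc)
      have := one_lt_length_of_two_mem 1 c h1T hcT (by omega)
      omega
  · show PySem.Set.contains _ 2 = _
    rw [Bool.eq_iff_iff, PySem.Set.contains_iff, List.contains_iff_mem, hmem]
    norm_num

theorem checkDoubleDigit_spec : Claim_equal_checkDoubleDigit := by
  intro value _
  unfold Spec_checkDoubleDigit checkDoubleDigit checkDoubleDigit_alt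
  simp only []
  cases hchars : PySem.Int.toChars value with
  | nil =>
    rw [foldA_eq_goRL]
    norm_num [goRL, runLengthsB, PySem.Set.ofList, PySem.Set.add, PySem.Set.empty,
      PySem.Set.len, PySem.List.len, PySem.Set.contains]
  | cons c cs =>
    have hc : c ≠ 'a' := toChars_head_ne_a value c cs hchars
    rw [foldA_eq_goRL]
    have hgo : goRL 'a' 1 (c :: cs) = 1 :: goRL c 1 cs := by
      rw [goRL]
      have : (c == 'a') = false := by simp [hc]
      rw [this]
      simp
    rw [hgo, ← runLengthsB_head, List.foldl_cons,
      PySem.Set.add_of_mem (by simp [PySem.Set.mem_ofList] : (1:Int) ∈ PySem.Set.ofList [1])]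
    exact main_set_eq _ (fun x hx => goRL_pos cs c 1 le_rfl x ((runLengthsB_head c cs) ▸ hx))
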